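-- pv_equiv track=rewrite | github.com/kulraghav/CodePractice | practice.py | get_down_slides
-- ===== SOURCE A (Python) =====
-- def get_down_slides(ranks):
--     down_slides = [1]
--     for i in range(len(ranks)-2, -1, -1):
--         if ranks[i+1] < ranks[i]:
--             down_slides.append(down_slides[-1] + 1)
--         else:
--             down_slides.append(1)
--     down_slides.reverse()
--     return down_slides
-- ===== SOURCE B (Python) =====
-- def get_down_slides(ranks):
--     n = len(ranks)
--     result = []
--     for i in range(n):
--         count = 1
--         j = i
--         while j + 1 < n and ranks[j + 1] < ranks[j]:
--             count += 1
--             j += 1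
--         result.append(count)
--     return result
-- ===== Notes on version B (the rewrite author's own statement) =====
-- stated objective: alternative
-- what changed: Replaces the single right-to-left incremental pass (append to a reversed accumulator seeded with [1], then reverse) by an independent forward walk from each start index that counts the descending run directly, producing one entry per element.
-- intended difference: On the empty list A returns a spurious one-element list containing 1 (the accidental seed of its accumulator), while B returns the empty list, the intended one-run-length-per-index result. — e.g. on get_down_slides([]): A returns [1], B returns []
import Mathlib
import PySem

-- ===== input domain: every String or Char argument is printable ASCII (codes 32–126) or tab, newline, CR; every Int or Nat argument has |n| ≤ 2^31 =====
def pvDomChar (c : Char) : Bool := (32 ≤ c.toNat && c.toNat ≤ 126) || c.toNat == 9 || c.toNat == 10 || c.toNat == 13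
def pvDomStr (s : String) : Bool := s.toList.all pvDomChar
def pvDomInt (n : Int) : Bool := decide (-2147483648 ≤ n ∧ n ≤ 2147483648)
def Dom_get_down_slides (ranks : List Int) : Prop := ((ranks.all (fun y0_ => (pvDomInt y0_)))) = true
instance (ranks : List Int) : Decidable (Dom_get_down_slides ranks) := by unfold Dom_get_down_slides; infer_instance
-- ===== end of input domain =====

-- B computes each descending-run length by an independent forward walk from each index instead of
-- A's single right-to-left incremental pass; on the empty list A keeps its accidental seed entry while B returns the empty list (see D_).


-- ===== PORT A =====
def get_down_slides (ranks : List Int) : List Int :=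
  let down_slides : List Int := [1]
  let down_slides := (PySem.List.pyRange (PySem.List.len ranks - 2) (-1) (-1)).foldl
    (fun ds i =>
      if PySem.List.pyGetD ranks (i + 1) 0 < PySem.List.pyGetD ranks i 0 then
        ds ++ [PySem.List.pyGetD ds (-1) 0 + 1]
      else
        ds ++ [1]) down_slides
  down_slides.reverse

-- ===== PORT B =====
-- the inner 'while j + 1 < n and ranks[j+1] < ranks[j]: count += 1; j += 1' loop of Source B
def pvWalk (ranks : List Int) (j : Nat) (count : Int) : Int :=
  if h : j + 1 < ranks.length ∧
      PySem.List.pyGetD ranks ((j : Int) + 1) 0 < PySem.List.pyGetD ranks (j : Int) 0 then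
    pvWalk ranks (j + 1) (count + 1)
  else
    count
termination_by ranks.length - j
decreasing_by omega

def get_down_slides_alt (ranks : List Int) : List Int :=
  (List.range ranks.length).foldl (fun res i => res ++ [pvWalk ranks i 1]) []

-- ===== PRECONDITION & SPEC =====
-- On the empty list A returns a spurious one-element list containing 1 (the accidental seed of its
-- accumulator), while B returns the empty list, the intended one-run-length-per-index result.
def D_get_down_slides (ranks : List Int) : Prop := ranks = []
instance (ranks : List Int) : Decidable (D_get_down_slides ranks) := by unfold D_get_down_slides; infer_instance
def Spec_get_down_slides (ranks : List Int) (out : List Int) : Prop := ¬ D_get_down_slides ranks → out = get_down_slides_alt ranks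
instance (ranks : List Int) (out : List Int) : Decidable (Spec_get_down_slides ranks out) := by unfold Spec_get_down_slides; infer_instance
def pvDiffWitness_get_down_slides : List Int := []
def pvDiffWitnessOut_get_down_slides : (List Int) × (List Int) := ([1], [])

-- ===== CLAIM (what is proved, stated in full; the proofs are below) =====
def Claim_unchanged_get_down_slides : Prop := ∀ (ranks : List Int), Dom_get_down_slides ranks → Spec_get_down_slides ranks (get_down_slides ranks)
def Claim_changed_get_down_slides : Prop := Dom_get_down_slides (pvDiffWitness_get_down_slides) ∧ D_get_down_slides (pvDiffWitness_get_down_slides) ∧ get_down_slides (pvDiffWitness_get_down_slides) = pvDiffWitnessOut_get_down_slides.1 ∧ get_down_slides_alt (pvDiffWitness_get_down_slides) = pvDiffWitnessOut_get_down_slides.2 ∧ pvDiffWitnessOut_get_down_slides.1 ≠ pvDiffWitnessOut_get_down_slides.2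
def Claim_exact_get_down_slides : Prop := ∀ (ranks : List Int), Dom_get_down_slides ranks → D_get_down_slides ranks → get_down_slides ranks ≠ get_down_slides_alt ranks

-- ===== LEMMAS AND PROOFS =====

-- reference function: the run-length list, by structural recursion on the list
def pvRef : List Int → List Int
  | [] => []
  | [_] => [1]
  | x :: y :: t => (if y < x then (pvRef (y :: t)).headI + 1 else 1) :: pvRef (y :: t)

theorem pvRef_ne_nil (x : Int) (xs : List Int) : pvRef (x :: xs) ≠ [] := by
  cases xs <;> simp [pvRef]

-- ---- B side ----
theorem pvWalk_unfold (ranks : List Int) (j : Nat) (c : Int) :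
    pvWalk ranks j c =
      if j + 1 < ranks.length ∧ ranks.getD (j + 1) 0 < ranks.getD j 0 then
        pvWalk ranks (j + 1) (c + 1)
      else c := by
  rw [pvWalk]
  have e : (j : Int) + 1 = ((j + 1 : Nat) : Int) := by push_cast; ring
  simp only [e, PySem.List.pyGetD_natCast, dite_eq_ite]

theorem pvCond_iff (x : Int) (xs : List Int) (j : Nat) :
    ((j + 1) + 1 < (x :: xs).length ∧ (x :: xs).getD (j + 1 + 1) 0 < (x :: xs).getD (j + 1) 0)
    ↔ (j + 1 < xs.length ∧ xs.getD (j + 1) 0 < xs.getD j 0) := by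
  simp only [List.getD_cons_succ, List.length_cons, Nat.add_lt_add_iff_right]

theorem pvWalk_shift_fuel (x : Int) (xs : List Int) :
    ∀ fuel j c, xs.length ≤ j + fuel → pvWalk (x :: xs) (j + 1) c = pvWalk xs j c := by
  intro fuel
  induction fuel with
  | zero =>
    intro j c hle
    rw [pvWalk_unfold, pvWalk_unfold xs, if_neg, if_neg]
    · omega
    · rw [pvCond_iff]; omega
  | succ fuel ih =>
    intro j c hle
    rw [pvWalk_unfold, pvWalk_unfold xs]
    by_cases hc : j + 1 < xs.length ∧ xs.getD (j + 1) 0 < xs.getD j 0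
    · rw [if_pos ((pvCond_iff x xs j).mpr hc), if_pos hc]
      exact ih (j + 1) (c + 1) (by omega)
    · rw [if_neg (fun h => hc ((pvCond_iff x xs j).mp h)), if_neg hc]

theorem pvWalk_shift (x : Int) (xs : List Int) (j : Nat) (c : Int) :
    pvWalk (x :: xs) (j + 1) c = pvWalk xs j c :=
  pvWalk_shift_fuel x xs xs.length j c (by omega)

theorem pvWalk_add_one (ranks : List Int) (j : Nat) (c : Int) :
    pvWalk ranks j (c + 1) = pvWalk ranks j c + 1 := by
  fun_induction pvWalk ranks j c with
  | case1 j c h ih => rw [pvWalk, dif_pos h, ih]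
  | case2 j c h => rw [pvWalk, dif_neg h]

theorem foldl_append_eq_map (n : Nat) (f : Nat → Int) (acc : List Int) :
    (List.range n).foldl (fun res i => res ++ [f i]) acc = acc ++ (List.range n).map f := by
  induction n generalizing acc with
  | zero => simp
  | succ n ih => simp [List.range_succ, ih]

theorem alt_eq_map (ranks : List Int) :
    get_down_slides_alt ranks = (List.range ranks.length).map (fun i => pvWalk ranks i 1) := by
  simpa [get_down_slides_alt] using foldl_append_eq_map ranks.length (fun i => pvWalk ranks i 1) []

theorem alt_cons (x : Int) (xs : List Int) :
    get_down_slides_alt (x :: xs) = pvWalk (x :: xs) 0 1 :: get_down_slides_alt xs := by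
  rw [alt_eq_map, alt_eq_map]
  simp only [List.length_cons, List.range_succ_eq_map, List.map_cons, List.map_map]
  refine congrArg _ ?_
  apply List.map_congr_left
  intro i _
  exact pvWalk_shift x xs i 1

theorem alt_head_cond (x y : Int) (t : List Int) :
    (0 + 1 < (x :: y :: t).length ∧ (x :: y :: t).getD (0 + 1) 0 < (x :: y :: t).getD 0 0) ↔ y < x := by
  simp

theorem alt_eq_ref (ranks : List Int) : get_down_slides_alt ranks = pvRef ranks := by
  induction ranks using pvRef.induct with
  | case1 => simp [get_down_slides_alt, pvRef]
  | case2 x =>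
    rw [alt_cons, pvWalk_unfold]
    simp [get_down_slides_alt, pvRef]
  | case3 x y t ih =>
    rw [alt_cons, ih, pvRef]
    have hh : (pvRef (y :: t)).headI = pvWalk (y :: t) 0 1 := by
      rw [← ih, alt_cons]
      simp
    congr 1
    rw [pvWalk_unfold]
    by_cases hyx : y < x
    · rw [if_pos ((alt_head_cond x y t).mpr hyx), if_pos hyx,
        pvWalk_shift x (y :: t) 0 (1 + 1), pvWalk_add_one (y :: t) 0 1, hh]
    · rw [if_neg (fun h => hyx ((alt_head_cond x y t).mp h)), if_neg hyx]

-- ---- A side ----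
theorem pyGetD_cons_shift (x : Int) (xs : List Int) (i : Int) (d : Int) (h : 0 ≤ i) :
    PySem.List.pyGetD (x :: xs) (i + 1) d = PySem.List.pyGetD xs i d := by
  lift i to Nat using h
  rw [show ((i : Int) + 1) = ((i + 1 : Nat) : Int) by push_cast; ring,
    PySem.List.pyGetD_natCast, PySem.List.pyGetD_natCast, List.getD_cons_succ]

theorem pyRange_neg_one_append (a m b : Int) (h1 : b ≤ m) (h2 : m ≤ a) :
    PySem.List.pyRange a b (-1) = PySem.List.pyRange a m (-1) ++ PySem.List.pyRange m b (-1) := by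
  rw [PySem.List.pyRange_neg_one_eq_reverse, PySem.List.pyRange_neg_one_eq_reverse,
    PySem.List.pyRange_neg_one_eq_reverse,
    PySem.List.pyRange_one_append (b + 1) (m + 1) (a + 1) (by omega) (by omega),
    List.reverse_append]

theorem A_loop (ranks : List Int) (h : ranks ≠ []) :
    (PySem.List.pyRange ((ranks.length : Int) - 2) (-1) (-1)).foldl
      (fun ds i =>
        if PySem.List.pyGetD ranks (i + 1) 0 < PySem.List.pyGetD ranks i 0 then
          ds ++ [PySem.List.pyGetD ds (-1) 0 + 1]
        else
          ds ++ [1]) [1] = (pvRef ranks).reverse := by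
  induction ranks using pvRef.induct with
  | case1 => exact absurd rfl h
  | case2 x =>
    rw [show ((([x] : List Int).length : Int) - 2) = -1 by simp,
      PySem.List.pyRange_neg_one_eq_nil (by omega)]
    simp [pvRef]
  | case3 x y t ih =>
    have hm : (((x :: y :: t).length : Int) - 2) = (t.length : Int) := by
      simp; ring
    rw [hm, pyRange_neg_one_append (t.length : Int) 0 (-1) (by omega) (by omega),
      List.foldl_append]
    have h0 : PySem.List.pyRange 0 (-1) (-1) = [0] := by
      rw [PySem.List.pyRange_neg_one_cons (by omega : (-1:Int) < 0),
        PySem.List.pyRange_neg_one_eq_nil (by omega)]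
    -- the indices t.length, …, 1 on x::y::t behave like t.length-1, …, 0 on y::t
    have hseg :
        (PySem.List.pyRange (t.length : Int) 0 (-1)).foldl
          (fun ds i =>
            if PySem.List.pyGetD (x :: y :: t) (i + 1) 0 < PySem.List.pyGetD (x :: y :: t) i 0 then
              ds ++ [PySem.List.pyGetD ds (-1) 0 + 1]
            else ds ++ [1]) [1] = (pvRef (y :: t)).reverse := by
      have hb : (((y :: t).length : Int) - 2) = (t.length : Int) - 1 := by
        simp; ring
      have hA := ih (by simp)
      rw [hb] at hA
      rw [← hA, PySem.List.pyRange_neg_one (t.length : Int) 0,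
        PySem.List.pyRange_neg_one ((t.length : Int) - 1) (-1)]
      have hlen : ((t.length : Int) - 0).toNat = ((t.length : Int) - 1 - (-1)).toNat := by omega
      rw [hlen, List.foldl_map, List.foldl_map]
      apply PySem.List.foldl_congr_mem
      intro ds k hk
      have hk' : (k : Int) ≤ (t.length : Int) - 1 := by
        have := List.mem_range.mp hk
        omega
      have e1 : (t.length : Int) - (k : Int) = ((t.length : Int) - 1 - (k : Int)) + 1 := by ring
      rw [e1, pyGetD_cons_shift x (y :: t) (((t.length : Int) - 1 - (k : Int)) + 1) 0 (by omega),
        pyGetD_cons_shift x (y :: t) ((t.length : Int) - 1 - (k : Int)) 0 (by omega)]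
    rw [hseg, h0]
    -- last step: index 0
    obtain ⟨hd, rest, hE⟩ := List.exists_cons_of_ne_nil (pvRef_ne_nil y t)
    have hcond : PySem.List.pyGetD (x :: y :: t) (0 + 1) 0 = y := by
      rw [pyGetD_cons_shift x (y :: t) 0 0 (by omega), PySem.List.pyGetD_zero_cons]
    have hlast : PySem.List.pyGetD ((pvRef (y :: t)).reverse) (-1) 0 = (pvRef (y :: t)).headI := by
      rw [hE]
      simp [PySem.List.pyGetD_neg_one_append_singleton]
    simp only [List.foldl_cons, List.foldl_nil, hcond, PySem.List.pyGetD_zero_cons, hlast]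
    rw [pvRef]
    by_cases hyx : y < x
    · rw [if_pos hyx, if_pos hyx, List.reverse_cons]
    · rw [if_neg hyx, if_neg hyx, List.reverse_cons]

theorem A_eq_ref (ranks : List Int) (h : ranks ≠ []) : get_down_slides ranks = pvRef ranks := by
  unfold get_down_slides
  simp only [PySem.List.len_eq]
  rw [A_loop ranks h, List.reverse_reverse]

-- ===== VERDICT (by name: the statement is the Claim_ definition above) =====
theorem get_down_slides_spec : Claim_unchanged_get_down_slides := by
  intro ranks _ hD
  rw [A_eq_ref ranks (by simpa [D_get_down_slides] using hD), alt_eq_ref]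

theorem get_down_slides_changed : Claim_changed_get_down_slides := by
  unfold Claim_changed_get_down_slides; decide

theorem get_down_slides_tight : Claim_exact_get_down_slides := by
  intro ranks _ hD
  subst hD
  decide
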